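-- pv_equiv track=rewrite | github.com/abh1abh/dave3606-26v-solutions | week3/exercise9.py | dfs
-- ===== SOURCE A (Python) =====
-- def dfs(node, edges, node_values, visited):
--     # Depth-first search to sum node values
--     # If already visited, return 0
--     if node in visited:
--         return 0
--     # Mark as visited
--     visited.add(node)
--     # Start total with this node's value
--     total = node_values[node]
--     # Recurse for each neighbor
--     for neighbor in edges[node]:
--         total += dfs(neighbor, edges, node_values, visited)
--     return total
-- ===== SOURCE B (Python) =====
-- def dfs(node, edges, node_values, visited):
--     # Iterative DFS with an explicit worklist instead of recursion; same visited-set mutation.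
--     total = 0
--     stack = [node]
--     while stack:
--         n = stack.pop(0)
--         if n in visited:
--             continue
--         visited.add(n)
--         total += node_values[n]
--         stack = edges[n] + stack
--     return total
-- ===== Notes on version B (the rewrite author's own statement) =====
-- stated objective: alternative
-- what changed: Replaces A's recursion over neighbours by an iterative DFS with an explicit worklist (pop the front, push the popped node's edge list back on the front), accumulating the total in a loop variable instead of summing recursive calls.
import Mathlib
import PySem

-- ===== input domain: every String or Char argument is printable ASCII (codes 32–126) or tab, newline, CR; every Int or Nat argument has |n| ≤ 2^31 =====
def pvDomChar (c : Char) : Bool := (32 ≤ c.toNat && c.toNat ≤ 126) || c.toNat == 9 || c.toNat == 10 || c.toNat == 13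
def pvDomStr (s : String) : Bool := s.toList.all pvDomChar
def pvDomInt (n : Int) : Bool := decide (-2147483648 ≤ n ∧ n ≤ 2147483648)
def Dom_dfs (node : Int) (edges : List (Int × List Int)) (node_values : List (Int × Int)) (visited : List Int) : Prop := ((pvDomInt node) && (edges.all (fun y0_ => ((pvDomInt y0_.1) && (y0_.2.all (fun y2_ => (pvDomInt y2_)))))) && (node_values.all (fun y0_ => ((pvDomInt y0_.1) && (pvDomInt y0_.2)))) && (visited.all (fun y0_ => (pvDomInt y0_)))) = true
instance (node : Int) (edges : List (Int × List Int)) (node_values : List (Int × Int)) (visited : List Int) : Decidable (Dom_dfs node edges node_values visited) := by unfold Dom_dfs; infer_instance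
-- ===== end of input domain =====

-- B replaces A's recursion by an iterative explicit-worklist DFS (same visited-set mutation); equivalence is about the return value.

-- ===== PORT A =====
-- node_values[k] / edges[k]: dict lookup (first match); Pre_ guarantees the key exists wherever A evaluates it (KeyError excluded by Pre_)
def pvVal (node_values : List (Int × Int)) (k : Int) : Int := (List.lookup k node_values).getD 0
def pvEdg (edges : List (Int × List Int)) (k : Int) : List Int := (List.lookup k edges).getD []

-- A's recursion, state-threading the mutated visited set; fuel bounds the recursion DEPTH: each nested
-- call first adds a fresh node owning a node_values entry to visited, so depth ≤ node_values.length + 1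
-- and under Pre_ the fuel is never exhausted (lemma pv_dfsA_stable below).
def dfsA (edges : List (Int × List Int)) (nv : List (Int × Int)) : Nat → Int → List Int → Int × List Int
  | 0, _, visited => (0, visited)
  | fuel+1, node, visited =>
    if PySem.Set.contains visited node then (0, visited)
    else
      (pvEdg edges node).foldl
        (fun acc nb =>
          let r := dfsA edges nv fuel nb acc.2
          (acc.1 + r.1, r.2))
        (pvVal nv node, PySem.Set.add visited node)

def dfs (node : Int) (edges : List (Int × List Int)) (node_values : List (Int × Int)) (visited : List Int) : Int :=
  (dfsA edges node_values (node_values.length + 1) node visited).1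

-- ===== PORT B =====
def pvSumLen (edges : List (Int × List Int)) : Nat := (edges.map (fun p => p.2.length)).sum

-- B's while-loop over the worklist; fuel bounds the number of POPS: at most 1 initial element plus,
-- once per freshly visited node, that node's edge list; under Pre_ the fuel is never exhausted.
def loopB (edges : List (Int × List Int)) (nv : List (Int × Int)) : Nat → List Int → Int → List Int → Int
  | 0, _, total, _ => total
  | _+1, [], total, _ => total
  | fuel+1, n :: rest, total, visited =>
    if PySem.Set.contains visited n then loopB edges nv fuel rest total visited
    else loopB edges nv fuel (pvEdg edges n ++ rest) (total + pvVal nv n) (PySem.Set.add visited n)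

def dfs_alt (node : Int) (edges : List (Int × List Int)) (node_values : List (Int × Int)) (visited : List Int) : Int :=
  loopB edges node_values (1 + node_values.length * (1 + pvSumLen edges)) [node] 0 visited

-- ===== PRECONDITION & SPEC =====
-- Python A raises KeyError iff some node reachable from `node` (stopping at `visited`) lacks a
-- node_values or edges entry; Pre_ excludes exactly those inputs.  pvReach computes the reachable
-- set by bounded iteration (1 + total edge-target count steps always reach the fixpoint, so the
-- closure conjunct of Pre_ holds whenever A returns and Pre_ is exactly A's domain).
def pvKeyed (edges : List (Int × List Int)) (nv : List (Int × Int)) (n : Int) : Prop :=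
  (List.lookup n nv).isSome = true ∧ (List.lookup n edges).isSome = true

def pvStep (edges : List (Int × List Int)) (visited : List Int) (s : List Int) : List Int :=
  s.foldl (fun acc n =>
    (pvEdg edges n).foldl (fun acc m =>
      if acc.contains m || visited.contains m then acc else acc ++ [m]) acc) s

def pvReach (node : Int) (edges : List (Int × List Int)) (visited : List Int) : List Int :=
  (pvStep edges visited)^[1 + pvSumLen edges] (if visited.contains node then [] else [node])

def Pre_dfs (node : Int) (edges : List (Int × List Int)) (node_values : List (Int × Int)) (visited : List Int) : Prop :=
  (node ∈ visited ∨ node ∈ pvReach node edges visited) ∧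
  (∀ n ∈ pvReach node edges visited, pvKeyed edges node_values n) ∧
  (∀ n ∈ pvReach node edges visited, ∀ m ∈ pvEdg edges n, m ∈ visited ∨ m ∈ pvReach node edges visited)

instance (node : Int) (edges : List (Int × List Int)) (node_values : List (Int × Int)) (visited : List Int) : Decidable (Pre_dfs node edges node_values visited) := by
  unfold Pre_dfs pvKeyed; infer_instance

def pvWitness_dfs : Int × (List (Int × List Int)) × (List (Int × Int)) × List Int :=
  (1, [(1, [2]), (2, [])], [(1, 5), (2, 7)], [])

def Spec_dfs (node : Int) (edges : List (Int × List Int)) (node_values : List (Int × Int)) (visited : List Int) (out : Int) : Prop := out = dfs_alt node edges node_values visited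
instance (node : Int) (edges : List (Int × List Int)) (node_values : List (Int × Int)) (visited : List Int) (out : Int) : Decidable (Spec_dfs node edges node_values visited out) := by unfold Spec_dfs; infer_instance

-- ===== CLAIM (what is proved, stated in full; the proofs are below) =====
def Claim_equal_dfs : Prop := ∀ (node : Int) (edges : List (Int × List Int)) (node_values : List (Int × Int)) (visited : List Int), Dom_dfs node edges node_values visited → Pre_dfs node edges node_values visited → Spec_dfs node edges node_values visited (dfs node edges node_values visited)

-- ===== LEMMAS AND PROOFS =====

-- number of node_values entries whose key is not yet visited (the recursion-depth measure)
def pvKL (nv : List (Int × Int)) (v : List Int) : Nat :=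
  (nv.filter (fun p => !(PySem.Set.contains v p.1))).length

-- A's neighbour for-loop, as a named fold (the else-branch of dfsA at fuel+1 IS runA at fuel)
def runA (edges : List (Int × List Int)) (nv : List (Int × Int)) (f : Nat) (xs : List Int) (acc : Int × List Int) : Int × List Int :=
  xs.foldl (fun acc nb =>
    let r := dfsA edges nv f nb acc.2
    (acc.1 + r.1, r.2)) acc

theorem pv_dfsA_succ_mem (edges : List (Int × List Int)) (nv : List (Int × Int)) (f : Nat) (n : Int) (v : List Int)
    (h : PySem.Set.contains v n = true) : dfsA edges nv (f+1) n v = (0, v) := by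
  have h' : n ∈ v := (PySem.Set.contains_iff v n).1 h
  simp [dfsA, h']

theorem pv_dfsA_succ_new (edges : List (Int × List Int)) (nv : List (Int × Int)) (f : Nat) (n : Int) (v : List Int)
    (h : PySem.Set.contains v n = false) :
    dfsA edges nv (f+1) n v = runA edges nv f (pvEdg edges n) (pvVal nv n, PySem.Set.add v n) := by
  have h' : n ∉ v := by
    intro hm; rw [(PySem.Set.contains_iff v n).2 hm] at h; cases h
  simp [dfsA, h', runA]

theorem pv_mono_fold (edges : List (Int × List Int)) (nv : List (Int × Int)) (f : Nat)
    (hd : ∀ (n : Int) (v : List Int) (x : Int), x ∈ v → x ∈ (dfsA edges nv f n v).2)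
    (xs : List Int) : ∀ (acc : Int × List Int) (x : Int), x ∈ acc.2 → x ∈ (runA edges nv f xs acc).2 := by
  induction xs with
  | nil => intro acc x hx; simpa [runA] using hx
  | cons h t ih =>
    intro acc x hx
    have : runA edges nv f (h :: t) acc
        = runA edges nv f t (acc.1 + (dfsA edges nv f h acc.2).1, (dfsA edges nv f h acc.2).2) := by
      simp [runA]
    rw [this]
    exact ih _ x (hd h acc.2 x hx)

theorem pv_mono_dfsA (edges : List (Int × List Int)) (nv : List (Int × Int)) (f : Nat) :
    ∀ (n : Int) (v : List Int) (x : Int), x ∈ v → x ∈ (dfsA edges nv f n v).2 := by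
  induction f with
  | zero => intro n v x hx; simpa [dfsA] using hx
  | succ f ih =>
    intro n v x hx
    cases hc : PySem.Set.contains v n with
    | true => rw [pv_dfsA_succ_mem edges nv f n v hc]; exact hx
    | false =>
      rw [pv_dfsA_succ_new edges nv f n v hc]
      exact pv_mono_fold edges nv f ih _ _ x ((PySem.Set.mem_add _ _ _).2 (Or.inl hx))

theorem pv_contains_decide (v : List Int) (x : Int) : PySem.Set.contains v x = decide (x ∈ v) := by
  simp

theorem pv_kL_anti (nv : List (Int × Int)) (v w : List Int) (h : ∀ x, x ∈ v → x ∈ w) :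
    pvKL nv w ≤ pvKL nv v := by
  simp only [pvKL, pv_contains_decide]
  induction nv with
  | nil => simp
  | cons p t ih =>
    by_cases hw : p.1 ∈ w
    · by_cases hv : p.1 ∈ v
      · simpa [List.filter_cons, hw, hv] using ih
      · simp [hw, hv]
        exact Nat.le_succ_of_le ih
    · have hv : p.1 ∉ v := fun hx => hw (h _ hx)
      simpa [List.filter_cons, hw, hv] using ih

theorem pv_kL_add_lt (nv : List (Int × Int)) (v : List Int) (n : Int)
    (hk : (List.lookup n nv).isSome = true) (hn : PySem.Set.contains v n = false) :
    pvKL nv (PySem.Set.add v n) < pvKL nv v := by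
  have hnv : n ∉ v := by
    intro hm; rw [(PySem.Set.contains_iff v n).2 hm] at hn; cases hn
  have hadd : PySem.Set.add v n = v ++ [n] := by simp [PySem.Set.add, hnv]
  simp only [pvKL, pv_contains_decide, hadd]
  induction nv with
  | nil => simp [List.lookup] at hk
  | cons p t ih =>
    by_cases hpn : p.1 = n
    · have hpv : p.1 ∉ v := by rw [hpn]; exact hnv
      have htail : ((t.filter (fun p => !(decide (p.1 ∈ v ++ [n])))).length)
          ≤ ((t.filter (fun p => !(decide (p.1 ∈ v)))).length) := by
        have h2 := pv_kL_anti t v (v ++ [n]) (fun x hx => List.mem_append_left _ hx)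
        simp only [pvKL, pv_contains_decide] at h2
        exact h2
      simp [hpn, hnv]
      simpa using Nat.lt_succ_of_le htail
    · have hk' : (List.lookup n t).isSome = true := by
        cases p with
        | mk k val =>
          simp only [List.lookup] at hk
          have hb : (n == k) = false := beq_eq_false_iff_ne.2 (fun h => hpn (by simp [h.symm]))
          rw [hb] at hk
          exact hk
      by_cases hv : p.1 ∈ v
      · simpa [List.filter_cons, hv, List.mem_append] using ih hk'
      · simp [List.mem_append, hv, hpn]
        simpa using ih hk'

theorem pv_kL_le (nv : List (Int × Int)) (v : List Int) : pvKL nv v ≤ nv.length :=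
  List.length_filter_le _ _

theorem pv_edg_le (edges : List (Int × List Int)) (n : Int) :
    (pvEdg edges n).length ≤ pvSumLen edges := by
  induction edges with
  | nil => simp [pvEdg, List.lookup, pvSumLen]
  | cons p t ih =>
    obtain ⟨k, ns⟩ := p
    have hsum : pvSumLen ((k, ns) :: t) = ns.length + pvSumLen t := by simp [pvSumLen]
    cases hnk : n == k with
    | true =>
      have he : pvEdg ((k, ns) :: t) n = ns := by simp [pvEdg, List.lookup, hnk]
      rw [he, hsum]; omega
    | false =>
      have he : pvEdg ((k, ns) :: t) n = pvEdg t n := by simp [pvEdg, List.lookup, hnk]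
      rw [he, hsum]; omega

-- fuel irrelevance of A's recursion, given enough fuel (never exhausted under Pre_'s invariants)
theorem pv_run_stable_aux (edges : List (Int × List Int)) (nv : List (Int × Int)) (v0 R : List Int) (k : Nat)
    (IH : ∀ (f g : Nat) (n : Int) (v : List Int), pvKL nv v < k → pvKL nv v < f → pvKL nv v < g →
      (∀ x ∈ v0, x ∈ v) → (n ∈ v ∨ n ∈ R) → dfsA edges nv f n v = dfsA edges nv g n v) :
    ∀ (xs : List Int) (t : Int) (w : List Int) (f g : Nat), pvKL nv w < k → pvKL nv w < f → pvKL nv w < g →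
      (∀ x ∈ v0, x ∈ w) → (∀ m ∈ xs, m ∈ w ∨ m ∈ R) →
      runA edges nv f xs (t, w) = runA edges nv g xs (t, w) := by
  intro xs
  induction xs with
  | nil => intro t w f g _ _ _ _ _; simp [runA]
  | cons x xs ih =>
    intro t w f g hk hf hg hsub hmem
    have hx : dfsA edges nv f x w = dfsA edges nv g x w :=
      IH f g x w hk hf hg hsub (hmem x List.mem_cons_self)
    have hstepf : runA edges nv f (x :: xs) (t, w)
        = runA edges nv f xs (t + (dfsA edges nv f x w).1, (dfsA edges nv f x w).2) := by
      simp [runA]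
    have hstepg : runA edges nv g (x :: xs) (t, w)
        = runA edges nv g xs (t + (dfsA edges nv g x w).1, (dfsA edges nv g x w).2) := by
      simp [runA]
    rw [hstepf, hstepg, ← hx]
    have hmono : ∀ y ∈ w, y ∈ (dfsA edges nv f x w).2 := fun y hy => pv_mono_dfsA edges nv f x w y hy
    have hanti : pvKL nv (dfsA edges nv f x w).2 ≤ pvKL nv w := pv_kL_anti nv w _ hmono
    exact ih _ _ f g (lt_of_le_of_lt hanti hk) (lt_of_le_of_lt hanti hf) (lt_of_le_of_lt hanti hg)
      (fun y hy => hmono y (hsub y hy))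
      (fun m hm => (hmem m (List.mem_cons_of_mem _ hm)).imp (fun h => hmono m h) id)

theorem pv_dfsA_stable (edges : List (Int × List Int)) (nv : List (Int × Int)) (v0 R : List Int)
    (hK : ∀ n ∈ R, pvKeyed edges nv n)
    (hC : ∀ n ∈ R, ∀ m ∈ pvEdg edges n, m ∈ v0 ∨ m ∈ R) (k : Nat) :
    ∀ (f g : Nat) (n : Int) (v : List Int), pvKL nv v < k → pvKL nv v < f → pvKL nv v < g →
      (∀ x ∈ v0, x ∈ v) → (n ∈ v ∨ n ∈ R) → dfsA edges nv f n v = dfsA edges nv g n v := by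
  induction k with
  | zero => intro f g n v hk; exact absurd hk (Nat.not_lt_zero _)
  | succ k ihk =>
    intro f g n v hk hf hg hsub hn
    cases f with
    | zero => exact absurd hf (Nat.not_lt_zero _)
    | succ f' =>
      cases g with
      | zero => exact absurd hg (Nat.not_lt_zero _)
      | succ g' =>
        cases hc : PySem.Set.contains v n with
        | true => rw [pv_dfsA_succ_mem _ _ _ _ _ hc, pv_dfsA_succ_mem _ _ _ _ _ hc]
        | false =>
          have hnv : n ∉ v := by
            intro hm; rw [(PySem.Set.contains_iff v n).2 hm] at hc; cases hc
          have hnR : n ∈ R := hn.resolve_left hnv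
          have hky := hK n hnR
          unfold pvKeyed at hky
          have hlt := pv_kL_add_lt nv v n hky.1 hc
          rw [pv_dfsA_succ_new _ _ _ _ _ hc, pv_dfsA_succ_new _ _ _ _ _ hc]
          apply pv_run_stable_aux edges nv v0 R k ihk
          · omega
          · omega
          · omega
          · exact fun x hx => (PySem.Set.mem_add _ _ _).2 (Or.inl (hsub x hx))
          · intro m hm
            rcases hC n hnR m hm with hv0 | hR
            · exact Or.inl ((PySem.Set.mem_add _ _ _).2 (Or.inl (hsub m hv0)))
            · exact Or.inr hR

theorem pv_runA_stable (edges : List (Int × List Int)) (nv : List (Int × Int)) (v0 R : List Int)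
    (hK : ∀ n ∈ R, pvKeyed edges nv n)
    (hC : ∀ n ∈ R, ∀ m ∈ pvEdg edges n, m ∈ v0 ∨ m ∈ R)
    (xs : List Int) (t : Int) (w : List Int) (f g : Nat) (hf : pvKL nv w < f) (hg : pvKL nv w < g)
    (hsub : ∀ x ∈ v0, x ∈ w) (hmem : ∀ m ∈ xs, m ∈ w ∨ m ∈ R) :
    runA edges nv f xs (t, w) = runA edges nv g xs (t, w) :=
  pv_run_stable_aux edges nv v0 R (pvKL nv w + 1)
    (pv_dfsA_stable edges nv v0 R hK hC (pvKL nv w + 1)) xs t w f g (Nat.lt_succ_self _) hf hg hsub hmem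

theorem pv_runA_shift (edges : List (Int × List Int)) (nv : List (Int × Int)) (f : Nat)
    (xs : List Int) : ∀ (t : Int) (v : List Int),
    runA edges nv f xs (t, v) = (t + (runA edges nv f xs (0, v)).1, (runA edges nv f xs (0, v)).2) := by
  induction xs with
  | nil => intro t v; simp [runA]
  | cons x xs ih =>
    intro t v
    have hstep : ∀ (s : Int), runA edges nv f (x :: xs) (s, v)
        = runA edges nv f xs (s + (dfsA edges nv f x v).1, (dfsA edges nv f x v).2) := by
      intro s; simp [runA]
    rw [hstep t, hstep 0, ih (t + (dfsA edges nv f x v).1), ih (0 + (dfsA edges nv f x v).1)]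
    simp [Prod.mk.injEq]
    omega

theorem pv_runA_append (edges : List (Int × List Int)) (nv : List (Int × Int)) (f : Nat)
    (xs ys : List Int) (acc : Int × List Int) :
    runA edges nv f (xs ++ ys) acc = runA edges nv f ys (runA edges nv f xs acc) := by
  simp [runA, List.foldl_append]

theorem pv_main (edges : List (Int × List Int)) (nv : List (Int × Int)) (v0 R : List Int)
    (hK : ∀ n ∈ R, pvKeyed edges nv n)
    (hC : ∀ n ∈ R, ∀ m ∈ pvEdg edges n, m ∈ v0 ∨ m ∈ R) :
    ∀ (g : Nat) (stack : List Int) (total : Int) (v : List Int),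
      (∀ x ∈ v0, x ∈ v) → (∀ m ∈ stack, m ∈ v ∨ m ∈ R) →
      stack.length + pvKL nv v * (1 + pvSumLen edges) ≤ g →
      loopB edges nv g stack total v = total + (runA edges nv (nv.length + 1) stack (0, v)).1 := by
  intro g
  induction g with
  | zero =>
    intro stack total v _ _ hb
    have hnil : stack = [] := by
      cases stack with
      | nil => rfl
      | cons a b => simp at hb
    subst hnil
    simp [loopB, runA]
  | succ g ihg =>
    intro stack total v hsub hstack hb
    cases stack with
    | nil => simp [loopB, runA]
    | cons n rest =>
      cases hc : PySem.Set.contains v n with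
      | true =>
        have hm : n ∈ v := (PySem.Set.contains_iff v n).1 hc
        have hl : loopB edges nv (g+1) (n :: rest) total v = loopB edges nv g rest total v := by
          simp [loopB, hm]
        have hb' : rest.length + pvKL nv v * (1 + pvSumLen edges) ≤ g := by
          simp only [List.length_cons] at hb; omega
        rw [hl, ihg rest total v hsub (fun m hm => hstack m (List.mem_cons_of_mem _ hm)) hb']
        have hr : runA edges nv (nv.length + 1) (n :: rest) (0, v)
            = runA edges nv (nv.length + 1) rest (0, v) := by
          have h0 := pv_dfsA_succ_mem edges nv nv.length n v hc
          simp [runA, h0]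
        rw [hr]
      | false =>
        have hnv : n ∉ v := by
          intro hm; rw [(PySem.Set.contains_iff v n).2 hm] at hc; cases hc
        have hnR : n ∈ R := (hstack n List.mem_cons_self).resolve_left hnv
        have hky := hK n hnR
        unfold pvKeyed at hky
        have hlt := pv_kL_add_lt nv v n hky.1 hc
        have hedg := pv_edg_le edges n
        have hkv := pv_kL_le nv v
        have hl : loopB edges nv (g+1) (n :: rest) total v
            = loopB edges nv g (pvEdg edges n ++ rest) (total + pvVal nv n) (PySem.Set.add v n) := by
          simp [loopB, hnv]
        have hsub' : ∀ x ∈ v0, x ∈ PySem.Set.add v n :=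
          fun x hx => (PySem.Set.mem_add _ _ _).2 (Or.inl (hsub x hx))
        have hstack' : ∀ m ∈ pvEdg edges n ++ rest, m ∈ PySem.Set.add v n ∨ m ∈ R := by
          intro m hm
          rcases List.mem_append.1 hm with h1 | h2
          · rcases hC n hnR m h1 with hv0 | hR
            · exact Or.inl ((PySem.Set.mem_add _ _ _).2 (Or.inl (hsub m hv0)))
            · exact Or.inr hR
          · rcases hstack m (List.mem_cons_of_mem _ h2) with hv | hR
            · exact Or.inl ((PySem.Set.mem_add _ _ _).2 (Or.inl hv))
            · exact Or.inr hR
        have hb' : (pvEdg edges n ++ rest).length + pvKL nv (PySem.Set.add v n) * (1 + pvSumLen edges) ≤ g := by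
          have hmul : (pvKL nv (PySem.Set.add v n) + 1) * (1 + pvSumLen edges)
              ≤ pvKL nv v * (1 + pvSumLen edges) := Nat.mul_le_mul_right _ hlt
          rw [Nat.succ_mul] at hmul
          simp only [List.length_append, List.length_cons] at hb ⊢
          omega
        rw [hl, ihg _ _ _ hsub' hstack' hb']
        -- relate A's recursion step with the flattened worklist
        have hA : dfsA edges nv (nv.length + 1) n v
            = runA edges nv (nv.length + 1) (pvEdg edges n) (pvVal nv n, PySem.Set.add v n) := by
          rw [pv_dfsA_succ_new _ _ _ _ _ hc]
          apply pv_runA_stable edges nv v0 R hK hC _ _ _ _ _ (by omega)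
            (by omega) hsub'
          intro m hm
          rcases hC n hnR m hm with hv0 | hR
          · exact Or.inl ((PySem.Set.mem_add _ _ _).2 (Or.inl (hsub m hv0)))
          · exact Or.inr hR
        have hstep : runA edges nv (nv.length + 1) (n :: rest) (0, v)
            = runA edges nv (nv.length + 1) rest
                (0 + (dfsA edges nv (nv.length + 1) n v).1, (dfsA edges nv (nv.length + 1) n v).2) := by
          simp [runA]
        have hY : runA edges nv (nv.length + 1) (pvEdg edges n) (pvVal nv n, PySem.Set.add v n)
            = (pvVal nv n + (runA edges nv (nv.length + 1) (pvEdg edges n) (0, PySem.Set.add v n)).1,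
               (runA edges nv (nv.length + 1) (pvEdg edges n) (0, PySem.Set.add v n)).2) :=
          pv_runA_shift edges nv _ _ _ _
        have happ : runA edges nv (nv.length + 1) (pvEdg edges n ++ rest) (0, PySem.Set.add v n)
            = runA edges nv (nv.length + 1) rest
                (runA edges nv (nv.length + 1) (pvEdg edges n) (0, PySem.Set.add v n)) :=
          pv_runA_append edges nv _ _ _ _
        rw [hstep, hA, hY, happ]
        have e2 : runA edges nv (nv.length + 1) rest
              (runA edges nv (nv.length + 1) (pvEdg edges n) (0, PySem.Set.add v n))
            = ((runA edges nv (nv.length + 1) (pvEdg edges n) (0, PySem.Set.add v n)).1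
                + (runA edges nv (nv.length + 1) rest
                    (0, (runA edges nv (nv.length + 1) (pvEdg edges n) (0, PySem.Set.add v n)).2)).1,
               (runA edges nv (nv.length + 1) rest
                  (0, (runA edges nv (nv.length + 1) (pvEdg edges n) (0, PySem.Set.add v n)).2)).2) := by
          conv_lhs => rw [← Prod.mk.eta
            (p := runA edges nv (nv.length + 1) (pvEdg edges n) (0, PySem.Set.add v n))]
          exact pv_runA_shift edges nv _ _ _ _
        have e1 := pv_runA_shift edges nv (nv.length + 1) rest
          (0 + (pvVal nv n + (runA edges nv (nv.length + 1) (pvEdg edges n) (0, PySem.Set.add v n)).1))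
          ((runA edges nv (nv.length + 1) (pvEdg edges n) (0, PySem.Set.add v n)).2)
        rw [e2, e1]
        simp only []
        omega

-- ===== VERDICT (by name: the statement is the Claim_ definition above) =====
theorem dfs_spec : Claim_equal_dfs := by
  intro node edges nv visited _ hPre
  obtain ⟨h1, h2, h3⟩ := hPre
  unfold Spec_dfs dfs dfs_alt
  have hkle := pv_kL_le nv visited
  have hb : ([node] : List Int).length + pvKL nv visited * (1 + pvSumLen edges)
      ≤ 1 + nv.length * (1 + pvSumLen edges) := by
    have := Nat.mul_le_mul_right (1 + pvSumLen edges) hkle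
    simp only [List.length_singleton]
    omega
  have hmain := pv_main edges nv visited (pvReach node edges visited) h2 h3
    (1 + nv.length * (1 + pvSumLen edges)) [node] 0 visited (fun x hx => hx)
    (fun m hm => by rw [List.mem_singleton] at hm; subst hm; exact h1) hb
  rw [hmain]
  simp [runA]
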